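-- pv_equiv track=rewrite | github.com/Auracion/schema_generation_framework | sampling_system.py | update_order
-- ===== SOURCE A (Python) =====
-- def update_order(residue, qes2idx, idx2hdn, targets):
--     order = {hdn: 0 for hdn in targets}
--     for qes in residue:
--         gen_idx = qes2idx[qes]
--         hardness = set([idx2hdn[i] for i in gen_idx])
--         for hdn in hardness:
--             if hdn in order:
--                 order[hdn] += 1
--     order = sorted(order, key=lambda x: order[x])
--     return order
-- ===== SOURCE B (Python) =====
-- def update_order(residue, qes2idx, idx2hdn, targets):
--     # Inverted traversal: first materialise one hardness set per residue item,
--     # then count each target against those sets.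
--     sets = [set(idx2hdn[i] for i in qes2idx[qes]) for qes in residue]
--     order = {hdn: sum(hdn in s for s in sets) for hdn in targets}
--     return sorted(order, key=lambda x: order[x])
-- ===== Notes on version B (the rewrite author's own statement) =====
-- stated objective: alternative
-- what changed: Inverts the traversal: instead of one aggregating pass over residue that increments a pre-zeroed counter dict per hardness set, B first builds the list of per-qes hardness sets and then computes each target's count as a membership sum over that list.
import Mathlib
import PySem

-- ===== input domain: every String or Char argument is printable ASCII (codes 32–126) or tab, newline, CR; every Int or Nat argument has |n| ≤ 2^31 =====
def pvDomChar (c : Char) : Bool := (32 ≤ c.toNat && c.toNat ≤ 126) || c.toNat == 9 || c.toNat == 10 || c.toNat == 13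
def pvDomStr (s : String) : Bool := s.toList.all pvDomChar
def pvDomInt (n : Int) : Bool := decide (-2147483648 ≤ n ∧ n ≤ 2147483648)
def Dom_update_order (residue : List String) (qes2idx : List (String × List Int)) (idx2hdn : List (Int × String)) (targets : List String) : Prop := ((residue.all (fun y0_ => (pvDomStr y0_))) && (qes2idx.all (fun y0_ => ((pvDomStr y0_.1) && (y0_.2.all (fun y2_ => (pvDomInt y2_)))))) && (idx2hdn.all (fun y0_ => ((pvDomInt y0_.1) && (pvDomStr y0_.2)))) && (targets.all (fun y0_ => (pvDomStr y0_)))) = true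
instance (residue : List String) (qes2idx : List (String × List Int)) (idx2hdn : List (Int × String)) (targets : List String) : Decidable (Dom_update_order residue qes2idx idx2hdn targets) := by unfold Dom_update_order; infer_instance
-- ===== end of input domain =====

-- B inverts the traversal: it builds one hardness set per residue item first, then counts each
-- target by a membership sum over those sets (alternative decomposition, same results).


-- ===== PORT A =====
-- A's inner loop: for hdn in hardness: if hdn in order: order[hdn] += 1
-- (the Python iterates a set in hash order; the increments commute, so the resulting dict,
-- which is only looked up afterwards, does not depend on that order)
def uoStep (order : PySem.Dict String Int) (hardness : PySem.Set String) : PySem.Dict String Int :=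
  hardness.foldl (fun d hdn => if d.contains hdn then d.modify hdn 0 (· + 1) else d) order

-- A's outer loop over residue; 'none' exactly where the Python raises KeyError
def uoLoopA (q : PySem.Dict String (List Int)) (h : PySem.Dict Int String) :
    List String → PySem.Dict String Int → Option (PySem.Dict String Int)
  | [], order => some order
  | qes :: rest, order => do
      let gen_idx ← q.get? qes
      let hs ← gen_idx.mapM (fun i => h.get? i)
      uoLoopA q h rest (uoStep order (PySem.Set.ofList hs))

def update_order (residue : List String) (qes2idx : List (String × List Int)) (idx2hdn : List (Int × String)) (targets : List String) : List String :=
  let order0 := targets.foldl (fun d hdn => d.insert hdn (0 : Int)) PySem.Dict.empty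
  match uoLoopA (PySem.Dict.mk qes2idx) (PySem.Dict.mk idx2hdn) residue order0 with
  | none => []
  | some order => PySem.List.sorted order.keys (fun x => order.getD x 0) false

-- ===== PORT B =====
-- B's first pass: sets = [set(idx2hdn[i] for i in qes2idx[qes]) for qes in residue]
def uoSets (q : PySem.Dict String (List Int)) (h : PySem.Dict Int String) :
    List String → Option (List (PySem.Set String))
  | [] => some []
  | qes :: rest => do
      let idxs ← q.get? qes
      let hs ← idxs.mapM (fun i => h.get? i)
      let tl ← uoSets q h rest
      pure (PySem.Set.ofList hs :: tl)

def update_order_alt (residue : List String) (qes2idx : List (String × List Int)) (idx2hdn : List (Int × String)) (targets : List String) : List String :=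
  match uoSets (PySem.Dict.mk qes2idx) (PySem.Dict.mk idx2hdn) residue with
  | none => []
  | some sets =>
      let order := targets.foldl
        (fun d hdn => d.insert hdn ((sets.map (fun s => if s.contains hdn then (1 : Int) else 0)).sum))
        PySem.Dict.empty
      PySem.List.sorted order.keys (fun x => order.getD x 0) false

-- ===== PRECONDITION & SPEC =====
-- Pre_ excludes exactly the inputs where the Python raises KeyError: some qes of residue
-- missing from qes2idx, or some generated index missing from idx2hdn.
def Pre_update_order (residue : List String) (qes2idx : List (String × List Int)) (idx2hdn : List (Int × String)) (targets : List String) : Prop :=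
  ∀ qes ∈ residue, (PySem.Dict.mk qes2idx).contains qes = true ∧
    ∀ i ∈ (PySem.Dict.mk qes2idx).getD qes [], (PySem.Dict.mk idx2hdn).contains i = true
instance (residue : List String) (qes2idx : List (String × List Int)) (idx2hdn : List (Int × String)) (targets : List String) : Decidable (Pre_update_order residue qes2idx idx2hdn targets) := by unfold Pre_update_order; infer_instance

def pvWitness_update_order : List String × (List (String × List Int)) × (List (Int × String)) × List String :=
  (["a", "b"], [("a", [0, 1]), ("b", [1])], [(0, "easy"), (1, "hard")], ["hard", "easy", "mid"])

def Spec_update_order (residue : List String) (qes2idx : List (String × List Int)) (idx2hdn : List (Int × String)) (targets : List String) (out : List String) : Prop := out = update_order_alt residue qes2idx idx2hdn targets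
instance (residue : List String) (qes2idx : List (String × List Int)) (idx2hdn : List (Int × String)) (targets : List String) (out : List String) : Decidable (Spec_update_order residue qes2idx idx2hdn targets out) := by unfold Spec_update_order; infer_instance

-- ===== CLAIM (what is proved, stated in full; the proofs are below) =====
def Claim_equal_update_order : Prop := ∀ (residue : List String) (qes2idx : List (String × List Int)) (idx2hdn : List (Int × String)) (targets : List String), Dom_update_order residue qes2idx idx2hdn targets → Pre_update_order residue qes2idx idx2hdn targets → Spec_update_order residue qes2idx idx2hdn targets (update_order residue qes2idx idx2hdn targets)

-- ===== LEMMAS AND PROOFS =====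

theorem mapM_get_isSome (h : PySem.Dict Int String) (l : List Int)
    (hp : ∀ i ∈ l, h.contains i = true) : (l.mapM (fun i => h.get? i)).isSome := by
  induction l with
  | nil => simp
  | cons x xs ih =>
    have hx := hp x (by simp)
    rw [PySem.Dict.contains_eq_isSome_get?] at hx
    obtain ⟨v, hv⟩ := Option.isSome_iff_exists.mp hx
    obtain ⟨tl, htl⟩ := Option.isSome_iff_exists.mp (ih (fun i hi => hp i (by simp [hi])))
    simp [List.mapM_cons, hv, htl]

theorem uoSets_isSome (q : PySem.Dict String (List Int)) (h : PySem.Dict Int String)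
    (residue : List String)
    (hp : ∀ qes ∈ residue, (q.contains qes = true) ∧ ∀ i ∈ q.getD qes [], h.contains i = true) :
    (uoSets q h residue).isSome := by
  induction residue with
  | nil => simp [uoSets]
  | cons qes rest ih =>
    obtain ⟨hc, hall⟩ := hp qes (by simp)
    rw [PySem.Dict.contains_eq_isSome_get?] at hc
    obtain ⟨idxs, hq⟩ := Option.isSome_iff_exists.mp hc
    have hgd : q.getD qes [] = idxs := by simp [PySem.Dict.getD_eq_get?_getD, hq]
    obtain ⟨hs, hm⟩ := Option.isSome_iff_exists.mp (mapM_get_isSome h idxs (hgd ▸ hall))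
    obtain ⟨tl, htl⟩ := Option.isSome_iff_exists.mp (ih (fun x hx => hp x (by simp [hx])))
    simp [uoSets, hq, hm, htl]

theorem uoLoopA_eq_uoSets (q : PySem.Dict String (List Int)) (h : PySem.Dict Int String)
    (residue : List String) (order : PySem.Dict String Int) :
    uoLoopA q h residue order = (uoSets q h residue).map (fun sets => sets.foldl uoStep order) := by
  induction residue generalizing order with
  | nil => simp [uoLoopA, uoSets]
  | cons qes rest ih =>
    cases hq : q.get? qes with
    | none => simp [uoLoopA, uoSets, hq]
    | some idxs =>
      cases hm : idxs.mapM (fun i => h.get? i) with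
      | none => simp [uoLoopA, uoSets, hq, hm]
      | some hs =>
        cases hrest : uoSets q h rest with
        | none => simp [uoLoopA, uoSets, hq, hrest, ih]
        | some tl => simp [uoLoopA, uoSets, hq, hm, hrest, ih]

theorem uoStep_contains (order : PySem.Dict String Int) (s : PySem.Set String) (t : String) :
    (uoStep order s).contains t = order.contains t := by
  unfold uoStep
  induction s generalizing order with
  | nil => simp
  | cons x xs ih =>
    simp only [List.foldl_cons]
    rw [ih]
    by_cases hc : order.contains x = true
    · simp [hc, PySem.Dict.contains_modify]
      intro ht; subst ht; exact hc
    · simp [Bool.not_eq_true] at hc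
      simp [hc]

theorem uoStep_getD (s : List String) :
    ∀ (order : PySem.Dict String Int) (t : String), s.Nodup →
    (uoStep order s).getD t 0 =
      order.getD t 0 + (if order.contains t = true ∧ t ∈ s then (1 : Int) else 0) := by
  induction s with
  | nil => intro order t _; simp [uoStep]
  | cons x xs ih =>
    intro order t hs
    rw [List.nodup_cons] at hs
    show (uoStep (if order.contains x = true then order.modify x 0 (· + 1) else order) xs).getD t 0 = _
    rw [ih _ t hs.2]
    by_cases hc : order.contains x = true
    · simp only [hc, if_true]
      rw [PySem.Dict.contains_modify, PySem.Dict.getD_modify]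
      by_cases ht : t = x
      · subst ht
        simp [hs.1, hc]
      · simp [ht, List.mem_cons]
    · simp only [Bool.not_eq_true] at hc
      simp only [hc, Bool.false_eq_true, if_false]
      by_cases ht : t = x
      · subst ht; simp [hc]
      · simp [List.mem_cons, ht]

theorem foldl_uoStep_getD (sets : List (PySem.Set String)) :
    ∀ (order : PySem.Dict String Int) (t : String), (∀ s ∈ sets, List.Nodup s) →
    (sets.foldl uoStep order).getD t 0 =
      order.getD t 0 + (if order.contains t = true
        then ((sets.map (fun s => if PySem.Set.contains s t then (1 : Int) else 0)).sum) else 0) := by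
  induction sets with
  | nil => intro order t _; simp
  | cons s ss ih =>
    intro order t hn
    simp only [List.foldl_cons, List.map_cons, List.sum_cons]
    rw [ih _ t (fun s hs => hn s (by simp [hs]))]
    rw [uoStep_contains, uoStep_getD s order t (hn s (by simp))]
    by_cases hc : order.contains t = true
    · simp only [hc, if_true, true_and]
      have : PySem.Set.contains s t = true ↔ t ∈ s := PySem.Set.contains_iff s t
      by_cases hm : t ∈ s
      · simp [hm]; ring
      · have : PySem.Set.contains s t = false := by
          rw [← Bool.not_eq_true]; exact fun h => hm (PySem.Set.contains_iff s t |>.mp h)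
        simp [hm]
    · simp only [Bool.not_eq_true] at hc
      simp [hc]

theorem uoStep_keys (order : PySem.Dict String Int) (s : PySem.Set String) :
    (uoStep order s).keys = order.keys := by
  unfold uoStep
  induction s generalizing order with
  | nil => simp
  | cons x xs ih =>
    simp only [List.foldl_cons]
    rw [ih]
    by_cases hc : order.contains x = true
    · simp [hc, PySem.Dict.keys_modify, PySem.Dict.keys_insert_of_contains order _ hc]
    · simp only [Bool.not_eq_true] at hc
      simp [hc]

theorem foldl_uoStep_keys (sets : List (PySem.Set String)) (order : PySem.Dict String Int) :
    (sets.foldl uoStep order).keys = order.keys := by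
  induction sets generalizing order with
  | nil => rfl
  | cons s ss ih => simp [List.foldl_cons, ih, uoStep_keys]

theorem uoSets_nodup (q : PySem.Dict String (List Int)) (h : PySem.Dict Int String)
    (residue : List String) (sets : List (PySem.Set String))
    (hs : uoSets q h residue = some sets) : ∀ s ∈ sets, List.Nodup s := by
  induction residue generalizing sets with
  | nil => simp [uoSets] at hs; subst hs; simp
  | cons qes rest ih =>
    simp only [uoSets] at hs
    cases hq : q.get? qes with
    | none => simp [hq] at hs
    | some idxs =>
      cases hm : idxs.mapM (fun i => h.get? i) with
      | none => simp [hq, hm] at hs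
      | some hl =>
        cases ht : uoSets q h rest with
        | none => simp [hq, ht] at hs
        | some tl =>
          simp [hq, hm, ht] at hs
          subst hs
          intro s hmem
          rcases List.mem_cons.mp hmem with rfl | hmem'
          · exact PySem.Set.nodup_ofList _
          · exact ih tl ht s hmem'

theorem getD_foldl_insert_fun (v : String → Int) (l : List String) :
    ∀ (d : PySem.Dict String Int) (k : String),
    (l.foldl (fun d t => d.insert t (v t)) d).getD k 0 = if k ∈ l then v k else d.getD k 0 := by
  induction l with
  | nil => intro d k; simp
  | cons x xs ih =>
    intro d k
    simp only [List.foldl_cons, ih]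
    by_cases hk : k ∈ xs
    · simp [hk]
    · by_cases hx : k = x
      · subst hx; simp [hk, PySem.Dict.getD_insert_self]
      · simp [hk, hx, PySem.Dict.getD_insert_of_ne]

theorem update_order_spec' (residue : List String) (qes2idx : List (String × List Int)) (idx2hdn : List (Int × String)) (targets : List String)
    (hpre : ∀ qes ∈ residue, ((PySem.Dict.mk qes2idx).contains qes = true) ∧
      ∀ i ∈ (PySem.Dict.mk qes2idx).getD qes [], (PySem.Dict.mk idx2hdn).contains i = true) :
    update_order residue qes2idx idx2hdn targets = update_order_alt residue qes2idx idx2hdn targets := by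
  obtain ⟨sets, hsets⟩ := Option.isSome_iff_exists.mp
    (uoSets_isSome (PySem.Dict.mk qes2idx) (PySem.Dict.mk idx2hdn) residue hpre)
  have hnods := uoSets_nodup _ _ _ _ hsets
  set v : String → Int := fun t => (sets.map (fun s => if PySem.Set.contains s t then (1 : Int) else 0)).sum with hv
  set order0 : PySem.Dict String Int := targets.foldl (fun d hdn => d.insert hdn (0 : Int)) PySem.Dict.empty with h0
  set dictB : PySem.Dict String Int := targets.foldl (fun (d : PySem.Dict String Int) hdn => d.insert hdn (v hdn)) PySem.Dict.empty with hB
  have hkeys0 : order0.keys = PySem.Set.ofList targets := by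
    have := PySem.Dict.keys_foldl_insert targets (fun _ _ => (0 : Int)) PySem.Dict.empty
    exact this.trans (by simp [PySem.Set.update_nil_left])
  have hkeysB : dictB.keys = PySem.Set.ofList targets := by
    have := PySem.Dict.keys_foldl_insert targets (fun _ t => v t) PySem.Dict.empty
    exact this.trans (by simp [PySem.Set.update_nil_left])
  have hnod0 : order0.keys.Nodup := by rw [hkeys0]; exact PySem.Set.nodup_ofList _
  have hnodB : dictB.keys.Nodup := by rw [hkeysB]; exact PySem.Set.nodup_ofList _
  have hdict : sets.foldl uoStep order0 = dictB := by
    apply PySem.Dict.ext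
    rw [PySem.Dict.items_eq_map_keys _ (by rw [foldl_uoStep_keys]; exact hnod0) 0,
        PySem.Dict.items_eq_map_keys _ hnodB 0, foldl_uoStep_keys, hkeys0, hkeysB]
    apply List.map_congr_left
    intro k hk
    have hkt : k ∈ targets := (PySem.Set.mem_ofList _ _).mp hk
    have hc0 : order0.contains k = true := (PySem.Dict.contains_iff_mem_keys _ _).mpr (hkeys0 ▸ hk)
    have hg0 : order0.getD k 0 = 0 := by
      rw [h0, getD_foldl_insert_fun (fun _ => (0 : Int)) targets PySem.Dict.empty k]
      simp
    have hga : (sets.foldl uoStep order0).getD k 0 = v k := by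
      rw [foldl_uoStep_getD sets order0 k hnods, hg0, hc0]
      simp [hv]
    have hgb : dictB.getD k 0 = v k := by
      rw [hB, getD_foldl_insert_fun v targets PySem.Dict.empty k]
      simp [hkt]
    simp [hga, hgb]
  show (match uoLoopA (PySem.Dict.mk qes2idx) (PySem.Dict.mk idx2hdn) residue order0 with
    | none => []
    | some order => PySem.List.sorted order.keys (fun x => order.getD x 0) false) = _
  rw [uoLoopA_eq_uoSets, hsets]
  show PySem.List.sorted (sets.foldl uoStep order0).keys
      (fun x => (sets.foldl uoStep order0).getD x 0) false = _
  rw [hdict]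
  simp only [update_order_alt]
  rw [hsets]

theorem update_order_eq (residue : List String) (qes2idx : List (String × List Int)) (idx2hdn : List (Int × String)) (targets : List String)
    (hpre : Pre_update_order residue qes2idx idx2hdn targets) :
    update_order residue qes2idx idx2hdn targets = update_order_alt residue qes2idx idx2hdn targets :=
  update_order_spec' residue qes2idx idx2hdn targets hpre

-- ===== VERDICT (by name: the statement is the Claim_ definition above) =====
theorem update_order_spec : Claim_equal_update_order := by
  intro residue qes2idx idx2hdn targets _ hpre
  exact update_order_eq residue qes2idx idx2hdn targets hpre
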